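-- pv_equiv track=rewrite | github.com/har-cl/Python | Python Programming Advance Assignment_12.py | meme_sum
-- ===== SOURCE A (Python) =====
-- def meme_sum(s1, s2):
--     s1 = str(s1)
--     s2 = str(s2)
--     sum = ''
--     max_length = max(len(s1), len(s2))
--     if len(s1) != max_length:
--         s1 = ((max_length-len(s1)) * '0' ) + s1
--     if len(s2) != max_length:
--         s2 = ((max_length-len(s2)) * '0' ) + s2
--     for i in range(max(len(s1), len(s2))):
--         sum += str(int(s1[i]) + int(s2[i]))
--     return sum
-- ===== SOURCE B (Python) =====
-- def meme_sum(s1, s2):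
--     # Align from the least-significant end: reverse both digit strings and
--     # consume them pairwise (filling with '0' when one runs out) -- no
--     # max-length/padding bookkeeping needed.
--     d1 = str(s1)[::-1]
--     d2 = str(s2)[::-1]
--     parts = []
--     while d1 or d2:
--         if d1:
--             a, d1 = d1[0], d1[1:]
--         else:
--             a = '0'
--         if d2:
--             b, d2 = d2[0], d2[1:]
--         else:
--             b = '0'
--         parts.append(str(int(a) + int(b)))
--     return ''.join(reversed(parts))
-- ===== Notes on version B (the rewrite author's own statement) =====
-- stated objective: alternative
-- what changed: B drops A's pad-to-max-length-then-index-forward loop: it reverses both digit strings, consumes them pairwise from the least-significant end with '0' fill into a parts list, and joins the reversed parts.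
import Mathlib
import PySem

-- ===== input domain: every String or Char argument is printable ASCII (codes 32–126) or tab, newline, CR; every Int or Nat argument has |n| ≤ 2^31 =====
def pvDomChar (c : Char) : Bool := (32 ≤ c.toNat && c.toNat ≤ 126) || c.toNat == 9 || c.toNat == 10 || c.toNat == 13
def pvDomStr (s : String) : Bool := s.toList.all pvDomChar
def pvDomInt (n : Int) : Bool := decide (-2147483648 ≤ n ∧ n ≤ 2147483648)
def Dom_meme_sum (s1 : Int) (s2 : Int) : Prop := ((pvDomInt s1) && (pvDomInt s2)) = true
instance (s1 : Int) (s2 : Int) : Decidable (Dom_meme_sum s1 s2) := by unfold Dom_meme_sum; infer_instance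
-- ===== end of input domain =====

-- B replaces A's zero-pad-to-max-length forward loop by reversing both digit strings and
-- consuming them pairwise from the least-significant end with '0' fill (alternative decomposition).


-- shared digit helper: str(int(a) + int(b)) for one-char strings a, b
-- (ofChars? returns none = ValueError on a non-digit char; Pre_ excludes the inputs where that
-- happens, so the .getD 0 default is never taken inside Pre_)
def pyDigitAdd (a b : Char) : List Char :=
  PySem.Int.toChars ((PySem.Int.ofChars? [a]).getD 0 + (PySem.Int.ofChars? [b]).getD 0)

-- ===== PORT A =====
def meme_sum (s1 : Int) (s2 : Int) : String :=
  let c1 := PySem.Int.toChars s1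
  let c2 := PySem.Int.toChars s2
  let maxLength : Int := max (PySem.Chars.len c1) (PySem.Chars.len c2)
  let c1 := if PySem.Chars.len c1 ≠ maxLength then
      PySem.List.pyRepeat ['0'] (maxLength - PySem.Chars.len c1) ++ c1 else c1
  let c2 := if PySem.Chars.len c2 ≠ maxLength then
      PySem.List.pyRepeat ['0'] (maxLength - PySem.Chars.len c2) ++ c2 else c2
  let sum := (PySem.List.pyRange 0 (max (PySem.Chars.len c1) (PySem.Chars.len c2)) 1).foldl
      (fun acc i => acc ++ pyDigitAdd (PySem.List.pyGetD c1 i ' ') (PySem.List.pyGetD c2 i ' ')) []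
  String.ofList sum

-- ===== PORT B =====
-- the while loop of Source B: consume both reversed digit lists, '0' fill, appending to parts
def memeLoop (d1 d2 : List Char) (parts : List (List Char)) : List (List Char) :=
  match d1, d2 with
  | [], [] => parts
  | a :: d1', [] => memeLoop d1' [] (parts ++ [pyDigitAdd a '0'])
  | [], b :: d2' => memeLoop [] d2' (parts ++ [pyDigitAdd '0' b])
  | a :: d1', b :: d2' => memeLoop d1' d2' (parts ++ [pyDigitAdd a b])

def meme_sum_alt (s1 : Int) (s2 : Int) : String :=
  let d1 := (PySem.Int.toChars s1).reverse
  let d2 := (PySem.Int.toChars s2).reverse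
  String.ofList (PySem.Chars.join [] ((memeLoop d1 d2 []).reverse))

-- ===== PRECONDITION & SPEC =====
-- Pre_ excludes negative inputs: str(n) then contains '-', on which int('-…') raises ValueError in A (and in B too).
def Pre_meme_sum (s1 : Int) (s2 : Int) : Prop := 0 ≤ s1 ∧ 0 ≤ s2
instance (s1 : Int) (s2 : Int) : Decidable (Pre_meme_sum s1 s2) := by unfold Pre_meme_sum; infer_instance
def pvWitness_meme_sum : Int × Int := (122, 81)

def Spec_meme_sum (s1 : Int) (s2 : Int) (out : String) : Prop := out = meme_sum_alt s1 s2
instance (s1 : Int) (s2 : Int) (out : String) : Decidable (Spec_meme_sum s1 s2 out) := by unfold Spec_meme_sum; infer_instance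

-- ===== CLAIM (what is proved, stated in full; the proofs are below) =====
def Claim_equal_meme_sum : Prop := ∀ (s1 : Int) (s2 : Int), Dom_meme_sum s1 s2 → Pre_meme_sum s1 s2 → Spec_meme_sum s1 s2 (meme_sum s1 s2)

-- ===== LEMMAS AND PROOFS =====

-- left-zero-padded digit lists, the common normal form both ports reach
def padL (m : Nat) (xs : List Char) : List Char := List.replicate (m - xs.length) '0' ++ xs
-- right padding, what B's zip-longest produces on the reversed lists
def padR (m : Nat) (xs : List Char) : List Char := xs ++ List.replicate (m - xs.length) '0'

def normalForm (s1 s2 : Int) : List Char :=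
  let c1 := PySem.Int.toChars s1
  let c2 := PySem.Int.toChars s2
  let m := max c1.length c2.length
  (((padL m c1).zip (padL m c2)).map (fun q => pyDigitAdd q.1 q.2)).flatten

-- zipLongest with '0' fill, mapped through pyDigitAdd: the list of parts memeLoop appends
def zl : List Char → List Char → List (List Char)
  | [], [] => []
  | a :: d1, [] => pyDigitAdd a '0' :: zl d1 []
  | [], b :: d2 => pyDigitAdd '0' b :: zl [] d2
  | a :: d1, b :: d2 => pyDigitAdd a b :: zl d1 d2

theorem memeLoop_eq_zl (d1 d2 : List Char) (parts : List (List Char)) :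
    memeLoop d1 d2 parts = parts ++ zl d1 d2 := by
  induction d1, d2, parts using memeLoop.induct with
  | case1 parts => simp [memeLoop, zl]
  | case2 a d1' parts ih => simp [memeLoop, zl, ih]
  | case3 b d2' parts ih => simp [memeLoop, zl, ih]
  | case4 a d1' b d2' parts ih => simp [memeLoop, zl, ih]

theorem zl_nil_left (d2 : List Char) :
    zl [] d2 = ((List.replicate d2.length '0').zip d2).map (fun q => pyDigitAdd q.1 q.2) := by
  induction d2 with
  | nil => simp [zl]
  | cons b d2 ih => simp [zl, List.replicate_succ, ih]

theorem zl_nil_right (d1 : List Char) :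
    zl d1 [] = (d1.zip (List.replicate d1.length '0')).map (fun q => pyDigitAdd q.1 q.2) := by
  induction d1 with
  | nil => simp [zl]
  | cons a d1 ih => simp [zl, List.replicate_succ, ih]

theorem zl_eq_zip_pad (d1 d2 : List Char) :
    zl d1 d2 = ((padR (max d1.length d2.length) d1).zip (padR (max d1.length d2.length) d2)).map
      (fun q => pyDigitAdd q.1 q.2) := by
  induction d1 generalizing d2 with
  | nil =>
    cases d2 with
    | nil => simp [zl, padR]
    | cons b d2 => simpa [padR] using zl_nil_left (b :: d2)
  | cons a d1 ih =>
    cases d2 with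
    | nil => simpa [padR] using zl_nil_right (a :: d1)
    | cons b d2 =>
      have h1 : max (a :: d1).length (b :: d2).length - (a :: d1).length
          = max d1.length d2.length - d1.length := by simp only [List.length_cons]; omega
      have h2 : max (a :: d1).length (b :: d2).length - (b :: d2).length
          = max d1.length d2.length - d2.length := by simp only [List.length_cons]; omega
      simp only [zl, padR, h1, h2, List.cons_append, List.zip_cons_cons, List.map_cons]
      exact congrArg _ (ih d2)

theorem length_padR (m : Nat) (xs : List Char) (h : xs.length ≤ m) : (padR m xs).length = m := by
  simp [padR]; omega

theorem length_padL (m : Nat) (xs : List Char) (h : xs.length ≤ m) : (padL m xs).length = m := by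
  simp [padL]; omega

-- reverse of a zip of equal-length lists
theorem zip_reverse_eq {α β : Type} (xs : List α) (ys : List β) (h : xs.length = ys.length) :
    (xs.zip ys).reverse = xs.reverse.zip ys.reverse := by
  apply List.ext_getElem
  · simp [h]
  · intro i h1 h2
    have hi : i < xs.length := by simp [h] at h1; omega
    simp [List.getElem_reverse, List.getElem_zip, h]

theorem padR_reverse (m : Nat) (xs : List Char) : (padR m xs.reverse).reverse = padL m xs := by
  simp [padR, padL]

-- join with empty separator is flatten
theorem join_nil_eq_flatten (l : List (List Char)) : PySem.Chars.join [] l = l.flatten := by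
  induction l with
  | nil => simp [PySem.Chars.join_nil]
  | cons p rest ih =>
    cases rest with
    | nil => simp [PySem.Chars.join, List.intercalate]
    | cons q r => rw [PySem.Chars.join_cons_cons]; simp_all

theorem alt_eq_normalForm (s1 s2 : Int) : meme_sum_alt s1 s2 = String.ofList (normalForm s1 s2) := by
  unfold meme_sum_alt normalForm
  dsimp only
  set c1 := PySem.Int.toChars s1 with hc1
  set c2 := PySem.Int.toChars s2 with hc2
  set m := max c1.length c2.length with hm
  have hm1 : c1.length ≤ m := le_max_left _ _
  have hm2 : c2.length ≤ m := le_max_right _ _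
  rw [memeLoop_eq_zl, List.nil_append, join_nil_eq_flatten, zl_eq_zip_pad]
  rw [← List.map_reverse, zip_reverse_eq _ _
    (by rw [length_padR _ _ (by simpa using hm1), length_padR _ _ (by simpa using hm2)])]
  rw [show max c1.reverse.length c2.reverse.length = m by simp [hm]] at *
  rw [padR_reverse, padR_reverse]

theorem pyRange_map_eq (p1 p2 : List Char) (m : Nat)
    (h1 : p1.length = m) (h2 : p2.length = m) :
    (PySem.List.pyRange 0 (m : Int) 1).map
        (fun i => pyDigitAdd (PySem.List.pyGetD p1 i ' ') (PySem.List.pyGetD p2 i ' '))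
      = (p1.zip p2).map (fun q => pyDigitAdd q.1 q.2) := by
  apply List.ext_getElem
  · simp [PySem.List.length_pyRange_one, h1, h2]
  · intro i hi hi'
    have him : i < m := by simpa [PySem.List.length_pyRange_one] using hi
    have hir : i < (PySem.List.pyRange 0 (m : Int) 1).length := by
      simpa using hi
    have hr : (PySem.List.pyRange 0 (m : Int) 1)[i]'hir = ((i : Int)) := by
      rw [PySem.List.getElem_pyRange_one]; ring
    simp only [List.getElem_map, hr]
    simp [List.getElem_zip, PySem.List.pyGetD_natCast, List.getD_eq_getElem?_getD,
      List.getElem?_eq_getElem, h1 ▸ him, h2 ▸ him]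

set_option maxHeartbeats 1000000 in
theorem a_eq_normalForm (s1 s2 : Int) : meme_sum s1 s2 = String.ofList (normalForm s1 s2) := by
  unfold meme_sum normalForm
  dsimp only
  set c1 := PySem.Int.toChars s1 with hc1
  set c2 := PySem.Int.toChars s2 with hc2
  set m := max c1.length c2.length with hm
  have hm1 : c1.length ≤ m := le_max_left _ _
  have hm2 : c2.length ≤ m := le_max_right _ _
  have hmax : max (PySem.Chars.len c1) (PySem.Chars.len c2) = (m : Int) := by
    simp [PySem.Chars.len_eq, hm, Nat.cast_max]
  rw [hmax]
  -- the padded strings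
  have hpad1 : (if PySem.Chars.len c1 ≠ (m : Int) then
      PySem.List.pyRepeat ['0'] ((m : Int) - PySem.Chars.len c1) ++ c1 else c1) = padL m c1 := by
    by_cases h : PySem.Chars.len c1 = (m : Int)
    · have : c1.length = m := by simpa [PySem.Chars.len_eq] using h
      simp [h, padL, this]
    · simp only [h, if_pos, ne_eq, not_false_eq_true, if_true]
      rw [PySem.List.pyRepeat_singleton]
      simp [padL, PySem.Chars.len_eq]
  have hpad2 : (if PySem.Chars.len c2 ≠ (m : Int) then
      PySem.List.pyRepeat ['0'] ((m : Int) - PySem.Chars.len c2) ++ c2 else c2) = padL m c2 := by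
    by_cases h : PySem.Chars.len c2 = (m : Int)
    · have : c2.length = m := by simpa [PySem.Chars.len_eq] using h
      simp [h, padL, this]
    · simp only [h, if_pos, ne_eq, not_false_eq_true, if_true]
      rw [PySem.List.pyRepeat_singleton]
      simp [padL, PySem.Chars.len_eq]
  rw [hpad1, hpad2]
  have hl1 : (padL m c1).length = m := length_padL m c1 hm1
  have hl2 : (padL m c2).length = m := length_padL m c2 hm2
  have hmax2 : max (PySem.Chars.len (padL m c1)) (PySem.Chars.len (padL m c2)) = (m : Int) := by
    simp [PySem.Chars.len_eq, hl1, hl2]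
  rw [hmax2, PySem.List.foldl_append_eq_flatMap, List.nil_append, List.flatMap_def,
    pyRange_map_eq _ _ m hl1 hl2]

-- ===== VERDICT (by name: the statement is the Claim_ definition above) =====
theorem meme_sum_spec : Claim_equal_meme_sum := by
  intro s1 s2 _ _
  unfold Spec_meme_sum
  rw [a_eq_normalForm, alt_eq_normalForm]
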